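-- pv_equiv track=rewrite | github.com/PrzemyslawSwiderski/algorithms-playground | problems/two-pluses/script.py | two_pluses
-- ===== SOURCE A (Python) =====
-- from itertools import product, combinations
--
-- def find_max_product(all_pluses):
--     max_prod = 0
--     for i in combinations(all_pluses, 2):
--         plus_1 = i[0]
--         plus_2 = i[1]
--         # check if the pluses are not overlapping each other
--         if not plus_1.intersection(plus_2):
--             prod = len(plus_1) * len(plus_2)
--             max_prod = max(max_prod, prod)
--     return max_prod
--
-- def two_pluses(grid):
--     all_pluses = []
--     # iterate through the grid
--     for i, j in product(range(len(grid)), range(len(grid[0]))):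
--         if grid[i][j] == 'G':
--             temp_pluses = set()
--             plus_max_length = len(grid) // 2
--             for k in range(0, plus_max_length + 1):
--                 # check if plus is within the grid
--                 if j - k < 0 or j + k > len(grid[0]) - 1 or i - k < 0 or i + k > len(grid) - 1:
--                     break
--                 # check if plus expanding is doable in all directions
--                 if grid[i][j - k] == grid[i][j + k] == grid[i - k][j] == grid[i + k][j] == 'G':
--                     # update set with the union
--                     temp_pluses.update(((i, j - k), (i, j + k,), (i - k, j), (i + k, j)))
--                     all_pluses.append(temp_pluses.copy())
--                 else:
--                     break
--
--     max_prod = find_max_product(all_pluses)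
--
--     return max_prod
-- ===== SOURCE B (Python) =====
-- def two_pluses(grid):
--     # B: the arm of the plus at each G cell is found directly as the min of the four
--     # directional G-run lengths (capped at len(grid)//2), instead of A's incremental
--     # cell-set growth; pluses are kept as (i, j, arm) triples and non-overlap of a
--     # pair is decided geometrically in O(1), with no set copies or intersections.
--     n = len(grid)
--     m = len(grid[0])
--     half = n // 2
--
--     def run(i, j, di, dj):
--         t = 0
--         while True:
--             r, c = i + (t + 1) * di, j + (t + 1) * dj
--             if 0 <= r <= n - 1 and 0 <= c <= m - 1 and grid[r][c] == 'G':
--                 t += 1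
--             else:
--                 return t
--
--     pluses = []
--     for i in range(n):
--         for j in range(m):
--             if grid[i][j] == 'G':
--                 arm = min(run(i, j, 0, -1), run(i, j, 0, 1),
--                           run(i, j, -1, 0), run(i, j, 1, 0), half)
--                 pluses.extend((i, j, k) for k in range(arm + 1))
--
--     def separate(p, q):
--         (i1, j1, k1), (i2, j2, k2) = p, q
--         if i1 == i2 and abs(j1 - j2) <= k1 + k2:
--             return False
--         if j1 == j2 and abs(i1 - i2) <= k1 + k2:
--             return False
--         if abs(i1 - i2) <= k2 and abs(j1 - j2) <= k1:
--             return False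
--         if abs(i1 - i2) <= k1 and abs(j1 - j2) <= k2:
--             return False
--         return True
--
--     products = [(4 * p[2] + 1) * (4 * q[2] + 1)
--                 for a, p in enumerate(pluses)
--                 for q in pluses[a + 1:] if separate(p, q)]
--     best = 0
--     for v in products:
--         best = max(best, v)
--     return best
-- ===== Notes on version B (the rewrite author's own statement) =====
-- stated objective: alternative
-- what changed: B finds each plus's arm directly as the min of four directional G-run lengths (instead of A's incremental cell-set growth with per-arm set copies), keeps pluses as (i, j, arm) triples, and decides non-overlap of each pair with an O(1) geometric test over suffix pairs instead of A's set intersections.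
import Mathlib
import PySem

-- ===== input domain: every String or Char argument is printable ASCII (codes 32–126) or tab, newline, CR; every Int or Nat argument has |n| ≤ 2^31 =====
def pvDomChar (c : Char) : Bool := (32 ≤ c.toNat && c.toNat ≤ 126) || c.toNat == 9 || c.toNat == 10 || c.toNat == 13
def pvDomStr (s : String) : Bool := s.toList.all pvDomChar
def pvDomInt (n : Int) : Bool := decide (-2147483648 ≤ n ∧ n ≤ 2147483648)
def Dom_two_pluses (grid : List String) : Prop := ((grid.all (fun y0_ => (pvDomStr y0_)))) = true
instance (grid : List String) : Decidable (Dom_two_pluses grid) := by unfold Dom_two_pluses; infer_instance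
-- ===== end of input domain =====

-- B finds each plus's arm as the min of four directional G-run lengths and tests pair
-- overlap geometrically, instead of A's incremental cell-set growth and set intersections
-- (objective: alternative algorithm; same results).

-- ===== PORT A =====
-- grid[i][j] as a character; the default ' ' is never read on inputs satisfying Pre_ (all
-- accesses are bounds-checked against len(grid) and len(grid[0]) first, where Python is in range)
def pvCell (g : List (List Char)) (i j : Int) : Char :=
  PySem.List.pyGetD (PySem.List.pyGetD g i []) j ' '

-- the 4 cells ((i, j-k), (i, j+k), (i-k, j), (i+k, j)) passed to temp_pluses.update, in order
def pvCells (i j : Int) (k : Nat) : List (Int × Int) :=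
  [(i, j - (k : Int)), (i, j + (k : Int)), (i - (k : Int), j), (i + (k : Int), j)]

-- A's inner 'for k in range(0, plus_max_length + 1)' loop with its two breaks
def growA (g : List (List Char)) (n m i j : Int) :
    Nat → Nat → PySem.Set (Int × Int) → List (PySem.Set (Int × Int)) → List (PySem.Set (Int × Int))
  | 0, _, _, acc => acc
  | fuel + 1, k, temp, acc =>
    if j - (k : Int) < 0 ∨ j + (k : Int) > m - 1 ∨ i - (k : Int) < 0 ∨ i + (k : Int) > n - 1 then
      acc
    else if pvCell g i (j - (k : Int)) = 'G' ∧ pvCell g i (j + (k : Int)) = 'G' ∧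
            pvCell g (i - (k : Int)) j = 'G' ∧ pvCell g (i + (k : Int)) j = 'G' then
      growA g n m i j fuel (k + 1) (PySem.Set.update temp (pvCells i j k))
        (acc ++ [PySem.Set.update temp (pvCells i j k)])
    else acc

-- inner scan of 'for i in combinations(all_pluses, 2)': pair p with each later element
def pvInnerA : PySem.Set (Int × Int) → List (PySem.Set (Int × Int)) → Int → Int
  | _, [], acc => acc
  | p, q :: qs, acc =>
    pvInnerA p qs
      (if (PySem.Set.inter p q).isEmpty then max acc (PySem.Set.len p * PySem.Set.len q) else acc)

def find_max_product : List (PySem.Set (Int × Int)) → Int → Int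
  | [], acc => acc
  | p :: ps, acc => find_max_product ps (pvInnerA p ps acc)

def two_pluses (grid : List String) : Int :=
  let g := grid.map String.toList
  let n := g.length
  let m := (g.headD []).length
  let allPluses :=
    (List.range n).foldl (fun acc (i : Nat) =>
      (List.range m).foldl (fun acc (j : Nat) =>
        if pvCell g (i : Int) (j : Int) = 'G' then
          growA g (n : Int) (m : Int) (i : Int) (j : Int) (n / 2 + 1) 0 PySem.Set.empty acc
        else acc) acc) []
  find_max_product allPluses 0

-- ===== PORT B =====
-- B's grid accessor (same ' ' default, never read under Pre_)
def pvAt (g : List (List Char)) (i j : Int) : Char :=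
  (PySem.List.pyGet? ((PySem.List.pyGet? g i).getD []) j).getD ' '

-- loop condition of B's 'run' helper at step s in direction (di, dj)
def condB (g : List (List Char)) (n m i j di dj s : Int) : Bool :=
  decide ((0 ≤ i + s * di ∧ i + s * di ≤ n - 1 ∧ 0 ≤ j + s * dj ∧ j + s * dj ≤ m - 1) ∧
          pvAt g (i + s * di) (j + s * dj) = 'G')

-- B's 'while True' run counter; called with fuel n+m, which always suffices (the in-bounds
-- test fails after at most m horizontal resp. n vertical steps), so the port is exact
def runB (g : List (List Char)) (n m i j di dj : Int) : Nat → Nat → Nat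
  | 0, t => t
  | fuel + 1, t =>
    if condB g n m i j di dj ((t : Int) + 1) then runB g n m i j di dj fuel (t + 1) else t

-- arm = min(run(0,-1), run(0,1), run(-1,0), run(1,0), n//2)
def armB (g : List (List Char)) (n m i j : Int) (fuel half : Nat) : Nat :=
  min (min (min (min (runB g n m i j 0 (-1) fuel 0) (runB g n m i j 0 1 fuel 0))
    (runB g n m i j (-1) 0 fuel 0)) (runB g n m i j 1 0 fuel 0)) half

-- B's geometric 'separate' early-return chain
def sepB (p q : Int × Int × Int) : Bool :=
  if p.1 = q.1 ∧ |p.2.1 - q.2.1| ≤ p.2.2 + q.2.2 then false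
  else if p.2.1 = q.2.1 ∧ |p.1 - q.1| ≤ p.2.2 + q.2.2 then false
  else if |p.1 - q.1| ≤ q.2.2 ∧ |p.2.1 - q.2.1| ≤ p.2.2 then false
  else if |p.1 - q.1| ≤ p.2.2 ∧ |p.2.1 - q.2.1| ≤ q.2.2 then false
  else true

-- the comprehension over (p, later q) pairs: suffix tails, filter, product
def prodListB (L : List (Int × Int × Int)) : List Int :=
  L.tails.flatMap (fun t =>
    match t with
    | [] => []
    | p :: qs => (qs.filter (fun q => sepB p q)).map
        (fun q => (4 * p.2.2 + 1) * (4 * q.2.2 + 1)))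

def two_pluses_alt (grid : List String) : Int :=
  let g := grid.map String.toList
  let n := g.length
  let m := (g.headD []).length
  let pluses := (List.range n).flatMap (fun (i : Nat) =>
    (List.range m).flatMap (fun (j : Nat) =>
      if pvAt g (i : Int) (j : Int) = 'G' then
        (List.range (armB g (n : Int) (m : Int) (i : Int) (j : Int) (n + m) (n / 2) + 1)).map
          (fun (k : Nat) => ((i : Int), (j : Int), (k : Int)))
      else []))
  (prodListB pluses).foldl max 0

-- ===== PRECONDITION & SPEC =====
-- Pre_ excludes exactly the grids on which A raises IndexError: the empty grid (grid[0]),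
-- and grids where some row is shorter than the first row (grid[i][j] for j < len(grid[0])).
def Pre_two_pluses (grid : List String) : Prop :=
  grid ≠ [] ∧ ∀ s ∈ grid, (grid.headD "").toList.length ≤ s.toList.length
instance (grid : List String) : Decidable (Pre_two_pluses grid) := by
  unfold Pre_two_pluses; infer_instance

def pvWitness_two_pluses : List String := ["GGG", "GGG", "GGG"]

def Spec_two_pluses (grid : List String) (out : Int) : Prop := out = two_pluses_alt grid
instance (grid : List String) (out : Int) : Decidable (Spec_two_pluses grid out) := by
  unfold Spec_two_pluses; infer_instance

-- ===== CLAIM (what is proved, stated in full; the proofs are below) =====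
def Claim_equal_two_pluses : Prop :=
  ∀ (grid : List String), Dom_two_pluses grid → Pre_two_pluses grid →
    Spec_two_pluses grid (two_pluses grid)

-- ===== LEMMAS AND PROOFS =====

-- the set A's temp_pluses holds after arm k was accepted
def plusSet (i j : Int) : Nat → PySem.Set (Int × Int)
  | 0 => PySem.Set.update PySem.Set.empty (pvCells i j 0)
  | k + 1 => PySem.Set.update (plusSet i j k) (pvCells i j (k + 1))

def toSet (t : Int × Int × Int) : PySem.Set (Int × Int) := plusSet t.1 t.2.1 t.2.2.toNat

-- the condition A's inner k-loop continues on
def okP (g : List (List Char)) (n m i j : Int) (k : Nat) : Bool :=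
  decide (¬(j - (k : Int) < 0 ∨ j + (k : Int) > m - 1 ∨ i - (k : Int) < 0 ∨ i + (k : Int) > n - 1) ∧
    (pvCell g i (j - (k : Int)) = 'G' ∧ pvCell g i (j + (k : Int)) = 'G' ∧
     pvCell g (i - (k : Int)) j = 'G' ∧ pvCell g (i + (k : Int)) j = 'G'))

-- number of consecutive true values of p starting at k, capped by the fuel
def cnt (p : Nat → Bool) : Nat → Nat → Nat
  | 0, _ => 0
  | fuel + 1, k => if p k then cnt p fuel (k + 1) + 1 else 0

lemma pvAt_eq (g : List (List Char)) (i j : Int) : pvAt g i j = pvCell g i j := by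
  simp [pvAt, pvCell, PySem.List.pyGetD]

lemma mem_plusSet (i j : Int) (k : Nat) (a b : Int) :
    (a, b) ∈ plusSet i j k ↔
      (a = i ∧ (b - j).natAbs ≤ k) ∨ (b = j ∧ (a - i).natAbs ≤ k) := by
  induction k with
  | zero =>
    simp [plusSet, pvCells, PySem.Set.empty, Prod.ext_iff]
    omega
  | succ k ih =>
    simp [plusSet, pvCells, ih, Prod.ext_iff]
    omega

lemma len_add_not_mem (s : PySem.Set (Int × Int)) (x : Int × Int) (h : x ∉ s) :
    (s.add x).length = s.length + 1 := by
  rw [PySem.Set.add_of_not_mem h]; simp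

lemma plusSet_zero (i j : Int) : plusSet i j 0 = [(i, j)] := by
  simp [plusSet, pvCells, PySem.Set.update_cons, PySem.Set.update_nil,
    PySem.Set.empty]

lemma len_plusSet (i j : Int) (k : Nat) : (plusSet i j k).length = 4 * k + 1 := by
  induction k with
  | zero => rw [plusSet_zero]; rfl
  | succ k ih =>
    have h1 : (i, j - ((k + 1 : Nat) : Int)) ∉ plusSet i j k := by
      simp [mem_plusSet]; omega
    have h2 : (i, j + ((k + 1 : Nat) : Int)) ∉
        (plusSet i j k).add (i, j - ((k + 1 : Nat) : Int)) := by
      simp [PySem.Set.mem_add, mem_plusSet, Prod.ext_iff]; omega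
    have h3 : (i - ((k + 1 : Nat) : Int), j) ∉
        ((plusSet i j k).add (i, j - ((k + 1 : Nat) : Int))).add
          (i, j + ((k + 1 : Nat) : Int)) := by
      simp [PySem.Set.mem_add, mem_plusSet, Prod.ext_iff]; omega
    have h4 : (i + ((k + 1 : Nat) : Int), j) ∉
        (((plusSet i j k).add (i, j - ((k + 1 : Nat) : Int))).add
          (i, j + ((k + 1 : Nat) : Int))).add (i - ((k + 1 : Nat) : Int), j) := by
      simp [PySem.Set.mem_add, mem_plusSet, Prod.ext_iff]; omega
    show (PySem.Set.update (plusSet i j k) (pvCells i j (k + 1))).length = _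
    rw [pvCells]
    simp only [PySem.Set.update_cons, PySem.Set.update_nil]
    rw [len_add_not_mem _ _ h4, len_add_not_mem _ _ h3, len_add_not_mem _ _ h2,
      len_add_not_mem _ _ h1, ih]
    omega

lemma inter_isEmpty (i1 j1 : Int) (k1 : Nat) (i2 j2 : Int) (k2 : Nat) :
    (PySem.Set.inter (plusSet i1 j1 k1) (plusSet i2 j2 k2)).isEmpty =
      sepB (i1, j1, (k1 : Int)) (i2, j2, (k2 : Int)) := by
  have hsep : sepB (i1, j1, (k1 : Int)) (i2, j2, (k2 : Int)) = true ↔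
      ¬((i1 = i2 ∧ |j1 - j2| ≤ (k1 : Int) + k2) ∨ (j1 = j2 ∧ |i1 - i2| ≤ (k1 : Int) + k2) ∨
        (|i1 - i2| ≤ (k2 : Int) ∧ |j1 - j2| ≤ (k1 : Int)) ∨
        (|i1 - i2| ≤ (k1 : Int) ∧ |j1 - j2| ≤ (k2 : Int))) := by
    unfold sepB
    split_ifs <;> simp_all
  rw [Bool.eq_iff_iff, hsep]
  simp only [List.isEmpty_iff, List.eq_nil_iff_forall_not_mem, PySem.Set.mem_inter]
  constructor
  · intro h hg
    simp only [abs_le] at hg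
    rcases hg with ⟨hij, hd⟩ | ⟨hij, hd⟩ | ⟨h1, h2⟩ | ⟨h1, h2⟩
    · exact h (i1, max (j1 - (k1 : Int)) (j2 - (k2 : Int)))
        ⟨by rw [mem_plusSet]; omega, by rw [mem_plusSet]; omega⟩
    · exact h (max (i1 - (k1 : Int)) (i2 - (k2 : Int)), j1)
        ⟨by rw [mem_plusSet]; omega, by rw [mem_plusSet]; omega⟩
    · exact h (i1, j2) ⟨by rw [mem_plusSet]; omega, by rw [mem_plusSet]; omega⟩
    · exact h (i2, j1) ⟨by rw [mem_plusSet]; omega, by rw [mem_plusSet]; omega⟩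
  · rintro h ⟨a, b⟩ ⟨hx1, hx2⟩
    rw [mem_plusSet] at hx1 hx2
    apply h
    simp only [abs_le]
    omega

-- A's k-loop yields one plus set per consecutive accepted arm
lemma growA_eq (g : List (List Char)) (n m i j : Int) :
    ∀ (fuel k : Nat) (temp : PySem.Set (Int × Int)) (acc : List (PySem.Set (Int × Int))),
      PySem.Set.update temp (pvCells i j k) = plusSet i j k →
      growA g n m i j fuel k temp acc =
        acc ++ (List.range' k (cnt (okP g n m i j) fuel k)).map (fun t => plusSet i j t) := by
  intro fuel
  induction fuel with
  | zero => intro k temp acc _; simp [growA, cnt]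
  | succ fuel ih =>
    intro k temp acc htemp
    rw [growA]
    by_cases hb : j - (k : Int) < 0 ∨ j + (k : Int) > m - 1 ∨ i - (k : Int) < 0 ∨
        i + (k : Int) > n - 1
    · rw [if_pos hb]
      have hok : okP g n m i j k = false := by
        simp only [okP, decide_eq_false_iff_not]
        tauto
      simp [cnt, hok]
    · rw [if_neg hb]
      by_cases hg : pvCell g i (j - (k : Int)) = 'G' ∧ pvCell g i (j + (k : Int)) = 'G' ∧
          pvCell g (i - (k : Int)) j = 'G' ∧ pvCell g (i + (k : Int)) j = 'G'
      · rw [if_pos hg]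
        have hok : okP g n m i j k = true := by
          simp only [okP, decide_eq_true_iff]
          exact ⟨hb, hg⟩
        have hinv : PySem.Set.update (PySem.Set.update temp (pvCells i j k))
            (pvCells i j (k + 1)) = plusSet i j (k + 1) := by
          rw [htemp]; rfl
        rw [ih (k + 1) _ _ hinv, htemp]
        simp only [cnt, hok, if_true, List.range'_succ, List.map_cons]
        simp
      · rw [if_neg hg]
        have hok : okP g n m i j k = false := by
          simp only [okP, decide_eq_false_iff_not]
          tauto
        simp [cnt, hok]

-- characterisation of cnt
lemma cnt_eq (p : Nat → Bool) :
    ∀ (fuel c k : Nat), c ≤ fuel → (∀ t, t < c → p (k + t) = true) →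
      (c < fuel → p (k + c) = false) → cnt p fuel k = c := by
  intro fuel
  induction fuel with
  | zero => intro c k hc _ _; interval_cases c; rfl
  | succ fuel ih =>
    intro c k hc htrue hfalse
    cases c with
    | zero =>
      have h0 : p k = false := by simpa using hfalse (by omega)
      simp [cnt, h0]
    | succ c =>
      have hk : p k = true := by simpa using htrue 0 (by omega)
      simp only [cnt, hk, if_true]
      rw [ih c (k + 1) (by omega)
        (fun t ht => by
          have := htrue (t + 1) (by omega)
          rwa [show k + (t + 1) = k + 1 + t by omega] at this)
        (fun h => by
          have := hfalse (by omega)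
          rwa [show k + (c + 1) = k + 1 + c by omega] at this)]

-- runB's result only witnesses true conditions …
lemma runB_cond (g : List (List Char)) (n m i j di dj : Int) :
    ∀ (fuel t s : Nat), t < s → s ≤ runB g n m i j di dj fuel t →
      condB g n m i j di dj (s : Int) = true := by
  intro fuel
  induction fuel with
  | zero =>
    intro t s h1 h2
    simp only [runB] at h2
    omega
  | succ fuel ih =>
    intro t s h1 h2
    by_cases hc : condB g n m i j di dj ((t : Int) + 1) = true
    · simp only [runB, hc, if_true] at h2
      rcases Nat.lt_or_ge (t + 1) s with hs | hs
      · exact ih (t + 1) s hs h2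
      · have : s = t + 1 := by omega
        subst this
        rwa [show ((t + 1 : Nat) : Int) = (t : Int) + 1 by push_cast; ring]
    · rw [runB, if_neg hc] at h2
      omega

-- … is bounded by the fuel, and fails right after when fuel was not exhausted
lemma runB_le (g : List (List Char)) (n m i j di dj : Int) :
    ∀ (fuel t : Nat), runB g n m i j di dj fuel t ≤ t + fuel ∧
      (runB g n m i j di dj fuel t < t + fuel →
        condB g n m i j di dj ((runB g n m i j di dj fuel t : Int) + 1) = false) := by
  intro fuel
  induction fuel with
  | zero =>
    intro t
    refine ⟨by simp [runB], fun h => by simp [runB] at h⟩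
  | succ fuel ih =>
    intro t
    by_cases hc : condB g n m i j di dj ((t : Int) + 1) = true
    · simp only [runB, hc, if_true]
      exact ⟨le_trans (ih (t + 1)).1 (by omega),
        fun h => (ih (t + 1)).2 (by omega)⟩
    · rw [runB, if_neg hc]
      exact ⟨by omega, fun _ => Bool.eq_false_iff.mpr hc⟩

-- the four direction instantiations of condB, flattened
lemma condL_iff (g : List (List Char)) (n m i j s : Int) :
    condB g n m i j 0 (-1) s = true ↔
      (0 ≤ i ∧ i ≤ n - 1 ∧ 0 ≤ j - s ∧ j - s ≤ m - 1 ∧ pvCell g i (j - s) = 'G') := by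
  have e1 : i + s * 0 = i := by ring
  have e2 : j + s * (-1) = j - s := by ring
  rw [condB, decide_eq_true_iff, e1, e2, pvAt_eq]
  tauto

lemma condR_iff (g : List (List Char)) (n m i j s : Int) :
    condB g n m i j 0 1 s = true ↔
      (0 ≤ i ∧ i ≤ n - 1 ∧ 0 ≤ j + s ∧ j + s ≤ m - 1 ∧ pvCell g i (j + s) = 'G') := by
  have e1 : i + s * 0 = i := by ring
  have e2 : j + s * 1 = j + s := by ring
  rw [condB, decide_eq_true_iff, e1, e2, pvAt_eq]
  tauto

lemma condU_iff (g : List (List Char)) (n m i j s : Int) :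
    condB g n m i j (-1) 0 s = true ↔
      (0 ≤ i - s ∧ i - s ≤ n - 1 ∧ 0 ≤ j ∧ j ≤ m - 1 ∧ pvCell g (i - s) j = 'G') := by
  have e1 : i + s * (-1) = i - s := by ring
  have e2 : j + s * 0 = j := by ring
  rw [condB, decide_eq_true_iff, e1, e2, pvAt_eq]
  tauto

lemma condD_iff (g : List (List Char)) (n m i j s : Int) :
    condB g n m i j 1 0 s = true ↔
      (0 ≤ i + s ∧ i + s ≤ n - 1 ∧ 0 ≤ j ∧ j ≤ m - 1 ∧ pvCell g (i + s) j = 'G') := by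
  have e1 : i + s * 1 = i + s := by ring
  have e2 : j + s * 0 = j := by ring
  rw [condB, decide_eq_true_iff, e1, e2, pvAt_eq]
  tauto

-- with fuel n+m the loop always stops on a failed condition, never on fuel
lemma runB_fail (g : List (List Char)) (nN mN iN jN : Nat) (di dj : Int)
    (hi : iN < nN) (hj : jN < mN)
    (hd : (di = 0 ∧ (dj = 1 ∨ dj = -1)) ∨ ((di = 1 ∨ di = -1) ∧ dj = 0)) :
    condB g nN mN iN jN di dj
      ((runB g nN mN iN jN di dj (nN + mN) 0 : Int) + 1) = false := by
  have hle := (runB_le g nN mN iN jN di dj (nN + mN) 0).1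
  rcases Nat.lt_or_ge (runB g nN mN iN jN di dj (nN + mN) 0) (nN + mN) with hlt | hge
  · exact (runB_le g nN mN iN jN di dj (nN + mN) 0).2 (by omega)
  · exfalso
    have hc : condB g nN mN iN jN di dj ((nN + mN : Nat) : Int) = true :=
      runB_cond g nN mN iN jN di dj (nN + mN) 0 (nN + mN) (by omega) (by omega)
    rw [condB, decide_eq_true_iff] at hc
    obtain ⟨⟨h1, h2, h3, h4⟩, -⟩ := hc
    rcases hd with ⟨rfl, rfl | rfl⟩ | ⟨rfl | rfl, rfl⟩ <;>
      simp only [mul_one, mul_zero, mul_neg_one, add_zero, ← sub_eq_add_neg]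
        at h1 h2 h3 h4 <;>
      omega

-- the B arm, +1, is exactly the number of consecutive arms A accepts
lemma arm_cnt (g : List (List Char)) (nN mN iN jN : Nat)
    (hi : iN < nN) (hj : jN < mN) (hG : pvCell g iN jN = 'G') :
    cnt (okP g nN mN iN jN) (nN / 2 + 1) 0 =
      armB g nN mN iN jN (nN + mN) (nN / 2) + 1 := by
  set rL := runB g nN mN iN jN 0 (-1) (nN + mN) 0 with hrL
  set rR := runB g nN mN iN jN 0 1 (nN + mN) 0 with hrR
  set rU := runB g nN mN iN jN (-1) 0 (nN + mN) 0 with hrU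
  set rD := runB g nN mN iN jN 1 0 (nN + mN) 0 with hrD
  have harm : armB g nN mN iN jN (nN + mN) (nN / 2) =
      min (min (min (min rL rR) rU) rD) (nN / 2) := rfl
  set a := armB g nN mN iN jN (nN + mN) (nN / 2) with ha
  apply cnt_eq
  · omega
  · intro t ht
    simp only [Nat.zero_add]
    rw [okP, decide_eq_true_iff]
    rcases Nat.eq_zero_or_pos t with rfl | hpos
    · refine ⟨by push_cast; omega, ?_⟩
      simp only [Nat.cast_zero, sub_zero, add_zero]
      exact ⟨hG, hG, hG, hG⟩
    · have hcL := (condL_iff g nN mN iN jN t).mp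
        (runB_cond g nN mN iN jN 0 (-1) (nN + mN) 0 t (by omega) (by omega))
      have hcR := (condR_iff g nN mN iN jN t).mp
        (runB_cond g nN mN iN jN 0 1 (nN + mN) 0 t (by omega) (by omega))
      have hcU := (condU_iff g nN mN iN jN t).mp
        (runB_cond g nN mN iN jN (-1) 0 (nN + mN) 0 t (by omega) (by omega))
      have hcD := (condD_iff g nN mN iN jN t).mp
        (runB_cond g nN mN iN jN 1 0 (nN + mN) 0 t (by omega) (by omega))
      obtain ⟨-, -, hbL, -, hgL⟩ := hcL
      obtain ⟨-, -, -, hbR, hgR⟩ := hcR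
      obtain ⟨hbU, -, -, -, hgU⟩ := hcU
      obtain ⟨-, hbD, -, -, hgD⟩ := hcD
      exact ⟨by omega, hgL, hgR, hgU, hgD⟩
  · intro hlt
    have hmin : a = rL ∨ a = rR ∨ a = rU ∨ a = rD := by omega
    simp only [Nat.zero_add]
    rw [okP, decide_eq_false_iff_not]
    rintro ⟨hb, hc1, hc2, hc3, hc4⟩
    push Not at hb
    obtain ⟨hb1, hb2, hb3, hb4⟩ := hb
    have haI : ((a + 1 : Nat) : Int) = (a : Int) + 1 := by push_cast; ring
    rcases hmin with h | h | h | h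
    · have hf := runB_fail g nN mN iN jN 0 (-1) hi hj (Or.inl ⟨rfl, Or.inr rfl⟩)
      rw [← hrL, ← h] at hf
      have htrue := (condL_iff g nN mN iN jN ((a + 1 : Nat) : Int)).mpr
        ⟨by omega, by omega, by omega, by omega, hc1⟩
      rw [haI] at htrue
      rw [htrue] at hf
      exact Bool.true_eq_false.mp hf
    · have hf := runB_fail g nN mN iN jN 0 1 hi hj (Or.inl ⟨rfl, Or.inl rfl⟩)
      rw [← hrR, ← h] at hf
      have htrue := (condR_iff g nN mN iN jN ((a + 1 : Nat) : Int)).mpr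
        ⟨by omega, by omega, by omega, by omega, hc2⟩
      rw [haI] at htrue
      rw [htrue] at hf
      exact Bool.true_eq_false.mp hf
    · have hf := runB_fail g nN mN iN jN (-1) 0 hi hj (Or.inr ⟨Or.inr rfl, rfl⟩)
      rw [← hrU, ← h] at hf
      have htrue := (condU_iff g nN mN iN jN ((a + 1 : Nat) : Int)).mpr
        ⟨by omega, by omega, by omega, by omega, hc3⟩
      rw [haI] at htrue
      rw [htrue] at hf
      exact Bool.true_eq_false.mp hf
    · have hf := runB_fail g nN mN iN jN 1 0 hi hj (Or.inr ⟨Or.inl rfl, rfl⟩)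
      rw [← hrD, ← h] at hf
      have htrue := (condD_iff g nN mN iN jN ((a + 1 : Nat) : Int)).mpr
        ⟨by omega, by omega, by omega, by omega, hc4⟩
      rw [haI] at htrue
      rw [htrue] at hf
      exact Bool.true_eq_false.mp hf

-- one grid cell: A's grow-from-empty equals the toSet image of B's per-cell triples
lemma cell_eq (g : List (List Char)) (nN mN i j : Nat) (hi : i < nN) (hj : j < mN)
    (acc : List (PySem.Set (Int × Int))) :
    (if pvCell g (i : Int) (j : Int) = 'G' then
        growA g (nN : Int) (mN : Int) (i : Int) (j : Int) (nN / 2 + 1) 0 PySem.Set.empty acc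
      else acc) =
      acc ++ ((if pvAt g (i : Int) (j : Int) = 'G' then
        (List.range (armB g (nN : Int) (mN : Int) (i : Int) (j : Int) (nN + mN) (nN / 2) + 1)).map
          (fun (k : Nat) => ((i : Int), (j : Int), (k : Int)))
      else []).map toSet) := by
  rw [pvAt_eq]
  by_cases hG : pvCell g (i : Int) (j : Int) = 'G'
  · rw [if_pos hG, if_pos hG]
    rw [growA_eq g (nN : Int) (mN : Int) (i : Int) (j : Int) (nN / 2 + 1) 0
      PySem.Set.empty acc rfl]
    rw [arm_cnt g nN mN i j hi hj hG]
    congr 1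
    rw [← List.range_eq_range', List.map_map]
    apply List.map_congr_left
    intro k _
    simp [toSet]
  · rw [if_neg hG, if_neg hG]
    simp

lemma rowA_eq (g : List (List Char)) (nN mN : Nat) (i : Nat) (hi : i < nN) :
    ∀ (js : List Nat) (acc : List (PySem.Set (Int × Int))), (∀ j ∈ js, j < mN) →
      js.foldl (fun acc (j : Nat) =>
        if pvCell g (i : Int) (j : Int) = 'G' then
          growA g (nN : Int) (mN : Int) (i : Int) (j : Int) (nN / 2 + 1) 0 PySem.Set.empty acc
        else acc) acc =
      acc ++ (js.flatMap (fun (j : Nat) =>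
        if pvAt g (i : Int) (j : Int) = 'G' then
          (List.range (armB g (nN : Int) (mN : Int) (i : Int) (j : Int) (nN + mN) (nN / 2) + 1)).map
            (fun (k : Nat) => ((i : Int), (j : Int), (k : Int)))
        else [])).map toSet := by
  intro js
  induction js with
  | nil => intro acc _; simp
  | cons j js ih =>
    intro acc hj
    simp only [List.foldl_cons, List.flatMap_cons, List.map_append]
    rw [cell_eq g nN mN i j hi (hj j (by simp)) acc]
    rw [ih _ (fun x hx => hj x (by simp [hx]))]
    simp [List.append_assoc]

-- A's whole scan produces exactly the toSet images of B's triples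
lemma pluses_eq (g : List (List Char)) (nN mN : Nat) :
    (List.range nN).foldl (fun acc (i : Nat) =>
      (List.range mN).foldl (fun acc (j : Nat) =>
        if pvCell g (i : Int) (j : Int) = 'G' then
          growA g (nN : Int) (mN : Int) (i : Int) (j : Int) (nN / 2 + 1) 0 PySem.Set.empty acc
        else acc) acc) [] =
    ((List.range nN).flatMap (fun (i : Nat) =>
      (List.range mN).flatMap (fun (j : Nat) =>
        if pvAt g (i : Int) (j : Int) = 'G' then
          (List.range (armB g (nN : Int) (mN : Int) (i : Int) (j : Int) (nN + mN) (nN / 2) + 1)).map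
            (fun (k : Nat) => ((i : Int), (j : Int), (k : Int)))
        else []))).map toSet := by
  have hgen : ∀ (is : List Nat) (acc : List (PySem.Set (Int × Int))), (∀ i ∈ is, i < nN) →
      is.foldl (fun acc (i : Nat) =>
        (List.range mN).foldl (fun acc (j : Nat) =>
          if pvCell g (i : Int) (j : Int) = 'G' then
            growA g (nN : Int) (mN : Int) (i : Int) (j : Int) (nN / 2 + 1) 0 PySem.Set.empty acc
          else acc) acc) acc =
      acc ++ (is.flatMap (fun (i : Nat) =>
        (List.range mN).flatMap (fun (j : Nat) =>
          if pvAt g (i : Int) (j : Int) = 'G' then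
            (List.range (armB g (nN : Int) (mN : Int) (i : Int) (j : Int) (nN + mN) (nN / 2) + 1)).map
              (fun (k : Nat) => ((i : Int), (j : Int), (k : Int)))
          else []))).map toSet := by
    intro is
    induction is with
    | nil => intro acc _; simp
    | cons i is ih =>
      intro acc hi
      simp only [List.foldl_cons, List.flatMap_cons, List.map_append]
      rw [rowA_eq g nN mN i (hi i (by simp)) (List.range mN) acc
        (fun j hj => List.mem_range.mp hj)]
      rw [ih _ (fun x hx => hi x (by simp [hx]))]
      simp [List.append_assoc]
  simpa using hgen (List.range nN) [] (fun i h => List.mem_range.mp h)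

-- pair phase: A's max over set pairs = fold of B's product comprehension
lemma innerA_eq (p : Int × Int × Int) (hp : 0 ≤ p.2.2) :
    ∀ (qs : List (Int × Int × Int)) (acc : Int), (∀ q ∈ qs, 0 ≤ q.2.2) →
      pvInnerA (toSet p) (qs.map toSet) acc =
        ((qs.filter (fun q => sepB p q)).map
          (fun q => (4 * p.2.2 + 1) * (4 * q.2.2 + 1))).foldl max acc := by
  obtain ⟨i1, j1, kk1⟩ := p
  simp only at hp
  intro qs
  induction qs with
  | nil => intro acc _; rfl
  | cons q qs ih =>
    intro acc hq
    obtain ⟨i2, j2, kk2⟩ := q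
    have hq2 : 0 ≤ kk2 := by simpa using hq (i2, j2, kk2) (List.mem_cons_self ..)
    have e1 : ((kk1.toNat : Int)) = kk1 := Int.toNat_of_nonneg hp
    have e2 : ((kk2.toNat : Int)) = kk2 := Int.toNat_of_nonneg hq2
    have hint : (PySem.Set.inter (toSet (i1, j1, kk1)) (toSet (i2, j2, kk2))).isEmpty =
        sepB (i1, j1, kk1) (i2, j2, kk2) := by
      rw [toSet, toSet]
      simp only
      rw [inter_isEmpty i1 j1 kk1.toNat i2 j2 kk2.toNat, e1, e2]
    have hl1 : PySem.Set.len (toSet (i1, j1, kk1)) = 4 * kk1 + 1 := by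
      simp [toSet, PySem.Set.len, len_plusSet]; omega
    have hl2 : PySem.Set.len (toSet (i2, j2, kk2)) = 4 * kk2 + 1 := by
      simp [toSet, PySem.Set.len, len_plusSet]; omega
    simp only [List.map_cons, pvInnerA, hint, hl1, hl2, List.filter_cons]
    rcases Bool.eq_false_or_eq_true (sepB (i1, j1, kk1) (i2, j2, kk2)) with hb | hb
    · simp only [hb]
      exact ih _ (fun q hq' => hq _ (by simp [hq']))
    · simp only [hb]
      exact ih _ (fun q hq' => hq _ (by simp [hq']))

lemma bestA_eq :
    ∀ (L : List (Int × Int × Int)) (acc : Int), (∀ q ∈ L, 0 ≤ q.2.2) →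
      find_max_product (L.map toSet) acc = (prodListB L).foldl max acc := by
  intro L
  induction L with
  | nil => intro acc _; rfl
  | cons p ps ih =>
    intro acc h
    have hcons : prodListB (p :: ps) =
        ((ps.filter (fun q => sepB p q)).map
          (fun q => (4 * p.2.2 + 1) * (4 * q.2.2 + 1))) ++ prodListB ps := by
      simp [prodListB]
    simp only [List.map_cons, find_max_product, hcons, List.foldl_append]
    rw [innerA_eq p (h _ (by simp)) ps acc (fun q hq => h _ (by simp [hq]))]
    exact ih _ (fun q hq => h _ (by simp [hq]))

-- ===== VERDICT (by name: the statement is the Claim_ definition above) =====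
theorem two_pluses_spec : Claim_equal_two_pluses := by
  intro grid _ _
  unfold Spec_two_pluses two_pluses two_pluses_alt
  simp only
  rw [pluses_eq]
  apply bestA_eq
  intro q hq
  simp only [List.mem_flatMap] at hq
  obtain ⟨i, -, j, -, hq⟩ := hq
  split at hq
  · simp only [List.mem_map, List.mem_range] at hq
    obtain ⟨k, -, rfl⟩ := hq
    exact Int.natCast_nonneg k
  · simp at hq
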